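-- pv_equiv track=rewrite | github.com/913-Herlea-Stefan-Alexandru/Facultate | An1 Facultate/Algebra/Proiect algebra 1/Project 2/Transitive relations.py | cond
-- ===== SOURCE A (Python) =====
-- def cond(new_trans):
--     '''
--     Checks if the current relation is transitive or not
--     :param new_trans: (list) a relation
--     :return: None if the relation is transitive or a list of one of the needed elements for the relation to be transitive
--     '''
--     for subset1 in new_trans:
--         for subset2 in new_trans:
--             if subset1 == subset2:
--                 continue
--             if subset1[1] == subset2[0]:
--                 temp_list = []
--                 temp_list.append(subset1[0])
--                 temp_list.append(subset2[1])
--                 if temp_list not in new_trans: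
--                     return temp_list
--     return None
-- ===== SOURCE B (Python) =====
-- def cond(new_trans):
--     # Adjacency index: bucket the pairs by their first coordinate (insertion order kept),
--     # so the inner loop only walks the pairs that can compose with subset1.
--     index = {}
--     for p in new_trans:
--         if p:
--             index.setdefault(p[0], []).append(p)
--     present = set(map(tuple, new_trans))
--     for s1 in new_trans:
--         for s2 in index.get(s1[1], []):
--             if s1 == s2:
--                 continue
--             t = [s1[0], s2[1]]
--             if tuple(t) not in present:
--                 return t
--     return None
-- ===== Notes on version B (the rewrite author's own statement) =====
-- stated objective: alternative
-- what changed: B builds an adjacency dict keyed by each pair's first coordinate and a set of existing pairs once, so the inner loop walks only the bucket matching subset1[1] and the membership test is a set lookup, instead of A's full inner scan plus list membership.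
-- outside the precondition, e.g. on cond([[5]]): A returns None, B raises IndexError
import Mathlib
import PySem

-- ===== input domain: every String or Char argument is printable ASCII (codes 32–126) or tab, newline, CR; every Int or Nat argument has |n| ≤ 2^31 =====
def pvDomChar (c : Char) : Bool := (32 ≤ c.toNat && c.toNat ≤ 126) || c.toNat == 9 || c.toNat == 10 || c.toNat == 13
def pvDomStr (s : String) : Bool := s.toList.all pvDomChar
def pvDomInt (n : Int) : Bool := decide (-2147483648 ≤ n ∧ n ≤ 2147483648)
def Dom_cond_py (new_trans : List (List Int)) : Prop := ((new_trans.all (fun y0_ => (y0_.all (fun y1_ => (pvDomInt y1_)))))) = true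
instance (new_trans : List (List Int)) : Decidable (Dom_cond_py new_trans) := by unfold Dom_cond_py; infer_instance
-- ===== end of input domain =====

-- B replaces A's full inner scan with an adjacency dict (pairs bucketed by first coordinate)
-- and a set for the membership test (objective: alternative traversal, same results).

-- ===== PORT A =====
-- inner 'for subset2 in new_trans' loop; `full` is new_trans (for the 'not in' test).
-- Under Pre_ every element has length ≥ 2, so pyGet? is always `some` and the `.getD 0`
-- defaults are never taken; the Option equality then coincides with Python's int equality.
def condAInner (full : List (List Int)) (s1 : List Int) : List (List Int) → Option (List Int)
  | [] => none
  | s2 :: rest =>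
    if s1 = s2 then condAInner full s1 rest
    else if PySem.List.pyGet? s1 1 = PySem.List.pyGet? s2 0 then
      let temp : List Int := [(PySem.List.pyGet? s1 0).getD 0, (PySem.List.pyGet? s2 1).getD 0]
      if temp ∈ full then condAInner full s1 rest else some temp
    else condAInner full s1 rest

def condAOuter (full : List (List Int)) : List (List Int) → Option (List Int)
  | [] => none
  | s1 :: rest =>
    match condAInner full s1 full with
    | some t => some t
    | none => condAOuter full rest

def cond_py (new_trans : List (List Int)) : Option (List Int) :=
  condAOuter new_trans new_trans

-- ===== PORT B =====
-- adjacency index: for p in new_trans: if p: index.setdefault(p[0], []).append(p)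
def condBIndex (new_trans : List (List Int)) : PySem.Dict Int (List (List Int)) :=
  new_trans.foldl
    (fun d p =>
      match p with
      | [] => d
      | k :: _ => d.modify k [] (fun b => b ++ [p]))
    PySem.Dict.empty

-- inner loop over the bucket index.get(s1[1], [])
def condBInner (s1 : List Int) (present : PySem.Set (List Int)) : List (List Int) → Option (List Int)
  | [] => none
  | s2 :: rest =>
    if s1 = s2 then condBInner s1 present rest
    else
      let t : List Int := [(PySem.List.pyGet? s1 0).getD 0, (PySem.List.pyGet? s2 1).getD 0]
      if t ∈ present then condBInner s1 present rest else some t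

def condBOuter (idx : PySem.Dict Int (List (List Int))) (present : PySem.Set (List Int)) :
    List (List Int) → Option (List Int)
  | [] => none
  | s1 :: rest =>
    match condBInner s1 present (idx.getD ((PySem.List.pyGet? s1 1).getD 0) []) with
    | some t => some t
    | none => condBOuter idx present rest

def cond_py_alt (new_trans : List (List Int)) : Option (List Int) :=
  condBOuter (condBIndex new_trans) (PySem.Set.ofList new_trans) new_trans

-- ===== PRECONDITION & SPEC =====
-- Pre_ excludes inputs containing a sublist of fewer than 2 elements: on most of them A
-- itself raises IndexError, and on the rest (e.g. a single short sublist) A only returns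
-- None because its index accesses happen to be skipped, while B's bucket lookup raises.
def Pre_cond_py (new_trans : List (List Int)) : Prop :=
  ∀ x ∈ new_trans, 2 ≤ x.length
instance (new_trans : List (List Int)) : Decidable (Pre_cond_py new_trans) := by
  unfold Pre_cond_py; infer_instance

def pvWitness_cond_py : List (List Int) := [[1, 2], [2, 3], [1, 3]]

def Spec_cond_py (new_trans : List (List Int)) (out : Option (List Int)) : Prop := out = cond_py_alt new_trans
instance (new_trans : List (List Int)) (out : Option (List Int)) : Decidable (Spec_cond_py new_trans out) := by unfold Spec_cond_py; infer_instance

-- ===== CLAIM (what is proved, stated in full; the proofs are below) =====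
def Claim_equal_cond_py : Prop := ∀ (new_trans : List (List Int)), Dom_cond_py new_trans → Pre_cond_py new_trans → Spec_cond_py new_trans (cond_py new_trans)

-- ===== LEMMAS AND PROOFS =====

-- bucket predicate: p lands in the bucket of key k
def bucketP (k : Int) (p : List Int) : Bool := decide (p ≠ []) && decide (p.headD 0 = k)

theorem condBIndex_getD (l : List (List Int)) (k : Int) :
    ∀ (d : PySem.Dict Int (List (List Int))),
      (l.foldl (fun d p =>
          match p with
          | [] => d
          | kk :: _ => d.modify kk [] (fun b => b ++ [p])) d).getD k []
        = d.getD k [] ++ l.filter (bucketP k) := by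
  induction l with
  | nil => intro d; simp
  | cons p t ih =>
    intro d
    match p with
    | [] => simpa [bucketP] using ih d
    | kk :: rest =>
      simp only [List.foldl_cons]
      rw [ih]
      by_cases h : k = kk
      · subst h
        simp [bucketP, PySem.Dict.getD_modify_self]
      · simp [bucketP, PySem.Dict.getD_modify, h, Ne.symm h]

theorem pyGet?_len2_one (a b : Int) (t : List Int) :
    PySem.List.pyGet? (a :: b :: t) 1 = some b := by
  have : (1 : Int) = ((1 : Nat) : Int) := rfl
  rw [this, PySem.List.pyGet?_natCast]
  rfl

theorem inner_eq (full : List (List Int)) (a b : Int) (t1 : List Int) :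
    ∀ (l : List (List Int)), (∀ x ∈ l, 2 ≤ x.length) →
      condAInner full (a :: b :: t1) l
        = condBInner (a :: b :: t1) (PySem.Set.ofList full) (l.filter (bucketP b)) := by
  intro l hl
  induction l with
  | nil => simp [condAInner, condBInner]
  | cons s2 rest ih =>
    have hs2 : 2 ≤ s2.length := hl s2 (by simp)
    have hrest : ∀ x ∈ rest, 2 ≤ x.length := fun x hx => hl x (by simp [hx])
    match s2, hs2 with
    | c :: d :: t2, _ =>
      by_cases heq : (a :: b :: t1) = (c :: d :: t2)
      · cases heq
        by_cases hkey : a = b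
        · subst hkey
          simp [condAInner, condBInner, bucketP, ih hrest]
        · simp [condAInner, bucketP, hkey, ih hrest]
      · by_cases hkey : c = b
        · subst hkey
          simp [condAInner, condBInner, bucketP, heq, PySem.Set.mem_ofList, ih hrest]
        · simp [condAInner, bucketP, heq, hkey, Ne.symm hkey, ih hrest]

theorem outer_eq (full : List (List Int)) (hfull : ∀ x ∈ full, 2 ≤ x.length) :
    ∀ (l : List (List Int)), (∀ x ∈ l, 2 ≤ x.length) →
      condAOuter full l
        = condBOuter (condBIndex full) (PySem.Set.ofList full) l := by
  intro l hl
  induction l with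
  | nil => simp [condAOuter, condBOuter]
  | cons s1 rest ih =>
    have hs1 : 2 ≤ s1.length := hl s1 (by simp)
    have hrest : ∀ x ∈ rest, 2 ≤ x.length := fun x hx => hl x (by simp [hx])
    match s1, hs1 with
    | a :: b :: t1, _ =>
      simp only [condAOuter, condBOuter]
      rw [pyGet?_len2_one]
      rw [show (condBIndex full).getD ((some b).getD 0) []
            = full.filter (bucketP b) from by
          simpa [condBIndex] using condBIndex_getD full b PySem.Dict.empty]
      rw [← inner_eq full a b t1 full hfull, ih hrest]

-- ===== VERDICT (by name: the statement is the Claim_ definition above) =====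
theorem cond_py_spec : Claim_equal_cond_py := by
  intro nt _ hpre
  unfold Spec_cond_py cond_py cond_py_alt
  exact outer_eq nt hpre nt hpre
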